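-- pv_equiv track=rewrite | github.com/gosch/Katas-in-python | 2019/Mar/arrayConversion.py | arrayConversion
-- ===== SOURCE A (Python) =====
-- def arrayConversion(inputArray):
--     a = inputArray[:]
--     flag = True
--     while len(a) > 1:
--         temp = []
--         for i in range(0, len(a), 2):
--             temp.append(a[i] + a[i+1]) if flag else temp.append(a[i] * a[i+1])
--         flag = not flag
--         a = temp[:]
--     return a[0]
-- ===== SOURCE B (Python) =====
-- def arrayConversion(inputArray):
--     def go(arr, add):
--         if len(arr) == 1:
--             return arr[0]
--         it = iter(arr)
--         nxt = [x + y if add else x * y for x, y in zip(it, it)]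
--         return go(nxt, not add)
--     return go(inputArray, True)
-- ===== Notes on version B (the rewrite author's own statement) =====
-- stated objective: idiomatic
-- what changed: A's indexed while-loop with list copies and an appending inner for-loop is replaced by a recursive level-by-level reduction that pairs consecutive elements via zip over one iterator, with no index arithmetic or copying; Pre_ excludes non-power-of-two lengths, on which A raises IndexError (and empty input, where both raise).
import Mathlib
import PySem

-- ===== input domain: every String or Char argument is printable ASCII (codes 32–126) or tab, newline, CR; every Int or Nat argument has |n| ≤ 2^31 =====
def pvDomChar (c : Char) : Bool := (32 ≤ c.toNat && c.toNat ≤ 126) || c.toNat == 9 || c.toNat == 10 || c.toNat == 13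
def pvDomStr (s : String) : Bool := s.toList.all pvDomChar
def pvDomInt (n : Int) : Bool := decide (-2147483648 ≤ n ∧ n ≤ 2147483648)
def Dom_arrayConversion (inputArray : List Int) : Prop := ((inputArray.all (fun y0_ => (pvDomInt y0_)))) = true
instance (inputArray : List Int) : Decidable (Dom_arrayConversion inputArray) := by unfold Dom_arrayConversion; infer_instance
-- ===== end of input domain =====

-- B replaces A's indexed while-loop (with list copies) by a recursive level-by-level
-- reduction pairing consecutive elements; equivalence is claimed on power-of-two lengths,
-- exactly the inputs where A returns (A raises IndexError otherwise).

-- ===== PORT A =====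
-- inner 'for i in range(0, len(a), 2): temp.append(a[i]+a[i+1]) if flag else temp.append(a[i]*a[i+1])'
-- none = IndexError (excluded by Pre_).
def tempLoopA (a : List Int) (flag : Bool) : List Int → List Int → Option (List Int)
  | [], temp => some temp
  | i :: is, temp =>
    match PySem.List.pyGet? a i, PySem.List.pyGet? a (i + 1) with
    | some x, some y => tempLoopA a flag is (temp ++ [if flag then x + y else x * y])
    | _, _ => none

-- the 'while len(a) > 1' loop; the fuel (length + 1 at the call site) is a totality guard
-- only and is never exhausted on inputs where the Python loop terminates.
def loopA : Nat → List Int → Bool → Int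
  | 0, _, _ => 0
  | fuel + 1, a, flag =>
    if a.length > 1 then
      match tempLoopA a flag (PySem.List.pyRange 0 (a.length : Int) 2) [] with
      | some temp => loopA fuel temp (!flag)
      | none => 0          -- IndexError (odd level length): excluded by Pre_
    else (PySem.List.pyGet? a 0).getD 0   -- IndexError on []: excluded by Pre_

def arrayConversion (inputArray : List Int) : Int :=
  loopA (inputArray.length + 1) inputArray true

-- ===== PORT B =====
-- '[x + y if add else x * y for x, y in zip(it, it)]' with it = iter(arr): consumes the
-- list two at a time, dropping a trailing odd element — exact pairing semantics of zip(it, it).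
def pairsB (add : Bool) : List Int → List Int
  | x :: y :: rest => (if add then x + y else x * y) :: pairsB add rest
  | _ => []

theorem pairsB_length (add : Bool) : ∀ l : List Int, (pairsB add l).length = l.length / 2
  | [] => by simp [pairsB]
  | [_] => by simp [pairsB]
  | _ :: _ :: rest => by
      simp only [pairsB, List.length_cons, pairsB_length add rest]; omega

-- 'def go(arr, add)'; the [] branch is a totality guard (the Python recurses forever there;
-- [] is excluded by Pre_).
def goB (arr : List Int) (add : Bool) : Int :=
  match arr with
  | [] => 0
  | [x] => x
  | x :: y :: rest => goB (pairsB add (x :: y :: rest)) (!add)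
termination_by arr.length
decreasing_by simp [pairsB_length]; omega

def arrayConversion_alt (inputArray : List Int) : Int := goB inputArray true

-- ===== PRECONDITION & SPEC =====
-- Pre_ admits exactly the lists of power-of-two length: on every other input A raises
-- IndexError (odd length reached while pairing, or empty on the final a[0]) and returns nothing.
def Pre_arrayConversion (inputArray : List Int) : Prop :=
  inputArray.length = 2 ^ Nat.log2 inputArray.length
instance (inputArray : List Int) : Decidable (Pre_arrayConversion inputArray) := by
  unfold Pre_arrayConversion; infer_instance

def pvWitness_arrayConversion : List Int := [1, 2, 3, 4]

def Spec_arrayConversion (inputArray : List Int) (out : Int) : Prop := out = arrayConversion_alt inputArray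
instance (inputArray : List Int) (out : Int) : Decidable (Spec_arrayConversion inputArray out) := by unfold Spec_arrayConversion; infer_instance

-- ===== CLAIM (what is proved, stated in full; the proofs are below) =====
def Claim_equal_arrayConversion : Prop := ∀ (inputArray : List Int), Dom_arrayConversion inputArray → Pre_arrayConversion inputArray → Spec_arrayConversion inputArray (arrayConversion inputArray)

-- ===== LEMMAS AND PROOFS =====

theorem pyRange_two_nil (a b : Int) (h : b ≤ a) : PySem.List.pyRange a b 2 = [] := by
  rw [PySem.List.pyRange_of_pos a b (by norm_num)]
  simp [show ¬ a < b by omega]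

theorem pyRange_two_cons (a b : Int) (h : a < b) :
    PySem.List.pyRange a b 2 = a :: PySem.List.pyRange (a + 2) b 2 := by
  rw [PySem.List.pyRange_of_pos a b (by norm_num),
      PySem.List.pyRange_of_pos (a + 2) b (by norm_num)]
  have hn : (if a < b then ((b - a + 2 - 1) / 2).toNat else 0)
      = (if a + 2 < b then ((b - (a + 2) + 2 - 1) / 2).toNat else 0) + 1 := by
    split_ifs <;> omega
  rw [hn, List.range_succ_eq_map, List.map_cons, List.map_map]
  congr 1
  · push_cast; ring
  · apply List.map_congr_left
    intro k _
    simp only [Function.comp_apply]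
    push_cast
    ring

theorem tempLoopA_spec : ∀ (tail pre temp : List Int) (flag : Bool), 2 ∣ tail.length →
    tempLoopA (pre ++ tail) flag
      (PySem.List.pyRange (pre.length : Int) ((pre.length : Int) + (tail.length : Int)) 2) temp
      = some (temp ++ pairsB flag tail)
  | [], pre, temp, flag, _ => by
      simp only [List.length_nil, Nat.cast_zero, add_zero, List.append_nil]
      rw [pyRange_two_nil _ _ le_rfl]
      simp [tempLoopA, pairsB]
  | [x], _, _, _, h => by simp only [List.length_cons, List.length_nil] at h; omega
  | x :: y :: rest, pre, temp, flag, h => by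
      have hb : (pre.length : Int) < (pre.length : Int) + ((x :: y :: rest).length : Int) := by
        simp only [List.length_cons]; push_cast; omega
      rw [pyRange_two_cons _ _ hb]
      have hx : PySem.List.pyGet? (pre ++ x :: y :: rest) (pre.length : Int) = some x :=
        PySem.List.pyGet?_append_length pre (y :: rest) x
      have hy : PySem.List.pyGet? (pre ++ x :: y :: rest) ((pre.length : Int) + 1) = some y := by
        have := PySem.List.pyGet?_append_right (pre := pre) (ys := x :: y :: rest) (k := 1)
        simpa using this
      simp only [tempLoopA, hx, hy]
      have hsplit : pre ++ x :: y :: rest = (pre ++ [x, y]) ++ rest := by simp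
      have hl2 : ((pre.length : Int) + 2) = ((pre ++ [x, y]).length : Int) := by
        simp only [List.length_append, List.length_cons, List.length_nil]; push_cast; ring
      have hl3 : ((pre.length : Int) + ((x :: y :: rest).length : Int))
          = ((pre ++ [x, y]).length : Int) + (rest.length : Int) := by
        simp only [List.length_append, List.length_cons, List.length_nil]; push_cast; ring
      rw [hsplit, hl2, hl3,
        tempLoopA_spec rest (pre ++ [x, y]) (temp ++ [if flag then x + y else x * y]) flag
          (by simp only [List.length_cons] at h ⊢; omega)]
      simp [pairsB]

theorem loopA_eq_goB (k : Nat) : ∀ (fuel : Nat) (a : List Int) (flag : Bool),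
    a.length = 2 ^ k → k < fuel → loopA fuel a flag = goB a flag := by
  induction k with
  | zero =>
    intro fuel a flag hl hf
    obtain _ | fuel := fuel
    · omega
    · match a, hl with
      | [x], _ => simp [loopA, goB, PySem.List.pyGet?, PySem.List.pyIdx?]
  | succ k ih =>
    intro fuel a flag hl hf
    obtain _ | fuel := fuel
    · omega
    ·
      have h1 : (1:Nat) ≤ 2 ^ k := Nat.one_le_two_pow
      have h2 : a.length > 1 := by rw [hl, pow_succ]; omega
      have hdvd : 2 ∣ a.length := by rw [hl, pow_succ]; omega
      have hstep := tempLoopA_spec a [] [] flag hdvd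
      simp only [List.nil_append, List.length_nil, Nat.cast_zero, zero_add] at hstep
      simp only [loopA, if_pos h2, hstep]
      have hlen : (pairsB flag a).length = 2 ^ k := by
        rw [pairsB_length, hl, pow_succ]; omega
      rw [ih fuel (pairsB flag a) (!flag) hlen (by omega)]
      obtain ⟨x, y, rest, rfl⟩ : ∃ x y rest, a = x :: y :: rest := by
        match a, h2 with
        | x :: y :: rest, _ => exact ⟨x, y, rest, rfl⟩
      conv_rhs => rw [goB]

-- ===== VERDICT (by name: the statement is the Claim_ definition above) =====
theorem arrayConversion_spec : Claim_equal_arrayConversion := by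
  intro l _ hpre
  unfold Spec_arrayConversion arrayConversion arrayConversion_alt
  unfold Pre_arrayConversion at hpre
  exact loopA_eq_goB (Nat.log2 l.length) (l.length + 1) l true hpre
    (by have := Nat.lt_two_pow_self (n := Nat.log2 l.length); omega)
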